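-- pv_equiv track=rewrite | github.com/zhaolx18/modflow-som-pso | PSO.py | get_spaces_format
-- ===== SOURCE A (Python) =====
-- def get_spaces_format(line):
--     parts = line.split()
--     spaces = []
--     start = 0
--     for part in parts:
--         start = line.find(part, start)
--         spaces.append(start)
--         start += len(part)
--     return spaces
-- ===== SOURCE B (Python) =====
-- def get_spaces_format(line):
--     spaces = []
--     in_token = False
--     for i, c in enumerate(line):
--         if c.isspace():
--             in_token = False
--         elif not in_token:
--             spaces.append(i)
--             in_token = True
--     return spaces
-- ===== Notes on version B (the rewrite author's own statement) =====
-- stated objective: alternative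
-- what changed: Replaces split()+repeated find() re-searches with a single left-to-right character scan keeping an in_token flag; no splitting, no substring searching.
import Mathlib
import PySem

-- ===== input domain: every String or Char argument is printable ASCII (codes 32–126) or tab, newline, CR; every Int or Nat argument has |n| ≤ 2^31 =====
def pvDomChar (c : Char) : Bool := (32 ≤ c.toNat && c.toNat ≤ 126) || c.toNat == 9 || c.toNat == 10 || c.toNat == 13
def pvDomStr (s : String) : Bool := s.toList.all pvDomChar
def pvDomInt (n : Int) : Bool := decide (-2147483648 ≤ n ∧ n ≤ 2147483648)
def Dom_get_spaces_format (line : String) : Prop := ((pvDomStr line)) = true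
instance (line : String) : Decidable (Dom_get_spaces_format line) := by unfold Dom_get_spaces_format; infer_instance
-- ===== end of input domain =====

-- B replaces A's split()+repeated find() re-searches by a single left-to-right
-- character scan with an in_token flag (objective: alternative single-pass algorithm).


-- ===== PORT A =====
-- parts = line.split(); loop: start = line.find(part, start); spaces.append(start); start += len(part)
def get_spaces_format (line : String) : List Int :=
  let parts := PySem.Str.split₀ line
  ((parts.foldl (fun (acc : List Int × Int) part =>
      let start := PySem.Str.findFrom line part acc.2
      (acc.1 ++ [start], start + PySem.Str.len part)) ([], 0))).1

-- ===== PORT B =====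
-- one pass over enumerate(line) with an in_token flag
def get_spaces_format_alt (line : String) : List Int :=
  ((PySem.List.enumerate line.toList 0).foldl
    (fun (st : List Int × Bool) ic =>
      if PySem.Chars.isspace ic.2 then (st.1, false)
      else if st.2 then st
      else (st.1 ++ [ic.1], true)) ([], false)).1

-- ===== PRECONDITION & SPEC =====
def Spec_get_spaces_format (line : String) (out : List Int) : Prop := out = get_spaces_format_alt line
instance (line : String) (out : List Int) : Decidable (Spec_get_spaces_format line out) := by unfold Spec_get_spaces_format; infer_instance

-- ===== CLAIM (what is proved, stated in full; the proofs are below) =====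
def Claim_equal_get_spaces_format : Prop := ∀ (line : String), Dom_get_spaces_format line → Spec_get_spaces_format line (get_spaces_format line)

-- ===== LEMMAS AND PROOFS =====

-- token starts and bodies of cs, scanning from absolute index i with reversed current word cur
def pvGo2 : List Char → List Char → Nat → List (Nat × List Char)
  | [], cur, i => if cur.isEmpty then [] else [(i - cur.length, cur.reverse)]
  | c :: rest, cur, i =>
    if PySem.Chars.isspace c then
      if cur.isEmpty then pvGo2 rest [] (i + 1)
      else (i - cur.length, cur.reverse) :: pvGo2 rest [] (i + 1)
    else pvGo2 rest (c :: cur) (i + 1)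

-- A's loop body as a recursion over the word list
def pvAfold (s : List Char) : List (List Char) → Int → List Int
  | [], _ => []
  | w :: ws, st =>
    let p := PySem.Chars.findFrom s w st
    p :: pvAfold s ws (p + w.length)

-- B's loop body as a recursion over the characters
def pvBscan : List Char → Int → Bool → List Int
  | [], _, _ => []
  | c :: rest, i, inTok =>
    if PySem.Chars.isspace c then pvBscan rest (i + 1) false
    else if inTok then pvBscan rest (i + 1) true
    else i :: pvBscan rest (i + 1) true

lemma pvFindAt (s w : List Char) (st e : Nat) (hst : st ≤ e)
    (hpre : w <+: s.drop e) (hw : w ≠ [])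
    (hnsp : ∀ c ∈ w, PySem.Chars.isspace c = false)
    (hws : ∀ j, st ≤ j → j < e → ∀ (hj : j < s.length), PySem.Chars.isspace s[j] = true) :
    PySem.Chars.findFrom s w (st : Int) = (e : Int) := by
  have hel : e ≤ s.length := by
    by_contra h
    have hnil : s.drop e = [] := List.drop_eq_nil_of_le (by omega)
    rw [hnil] at hpre
    exact hw (List.prefix_nil.mp hpre)
  -- no occurrence of w strictly before e (its head would be a whitespace char)
  have hno : ∀ i, st ≤ i → i < e → ¬ w <+: s.drop i := by
    intro i h1 h2 hp
    obtain ⟨h0, t, rfl⟩ := List.exists_cons_of_ne_nil hw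
    have hi : i < s.length := lt_of_lt_of_le h2 hel
    have h0lt : 0 < (s.drop i).length := by
      have := hp.length_le
      simp only [List.length_cons] at this
      omega
    have hhead : (s.drop i)[0] = h0 := (hp.getElem (by simp)).symm
    rw [List.getElem_drop] at hhead
    have hsp := hws i h1 h2 (by omega)
    have := hnsp h0 (List.mem_cons_self ..)
    simp only [show i + 0 = i from rfl] at hhead
    rw [hhead] at hsp
    rw [hsp] at this
    exact Bool.true_eq_false.mp this
  have hocc : w <+: (s.drop st).drop (e - st) := by
    rw [List.drop_drop, Nat.add_sub_cancel' hst]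
    exact hpre
  have hne : PySem.Chars.find (s.drop st) w ≠ -1 := by
    rw [PySem.Chars.find_ne_neg_one_iff]
    exact (PySem.Chars.isIn_iff_infix _ _).mp
      ((PySem.Chars.exists_prefix_drop_iff_isIn _ _).mp ⟨e - st, hocc⟩)
  have hge : (0 : Int) ≤ PySem.Chars.find (s.drop st) w := by
    have := PySem.Chars.neg_one_le_find (s.drop st) w
    omega
  obtain ⟨hso, hsm⟩ := PySem.Chars.find_spec hge
  have h1 : (PySem.Chars.find (s.drop st) w).toNat ≤ e - st := by
    by_contra h
    exact hsm (e - st) (by omega) hocc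
  have h2 : e - st ≤ (PySem.Chars.find (s.drop st) w).toNat := by
    by_contra h
    refine hno (st + (PySem.Chars.find (s.drop st) w).toNat) (by omega) (by omega) ?_
    rw [← List.drop_drop]
    exact hso
  have hfv : PySem.Chars.find (s.drop st) w = ((e - st : Nat) : Int) := by omega
  rw [PySem.Chars.findFrom_natCast s w st (le_trans hst hel), hfv]
  have : ((e - st : Nat) : Int) ≠ -1 := by omega
  simp only [this, if_false]
  have : (st : Int) + ((e - st : Nat) : Int) = (e : Int) := by omega
  omega

lemma pvSplitGo (cs : List Char) : ∀ cur acc (i : Nat),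
    PySem.Chars.split₀.go cs cur acc = acc.reverse ++ (pvGo2 cs cur i).map (·.2) := by
  induction cs with
  | nil =>
    intro cur acc i
    by_cases hc : cur.isEmpty <;>
      simp [PySem.Chars.split₀.go, pvGo2, hc]
  | cons c rest ih =>
    intro cur acc i
    by_cases hsp : PySem.Chars.isspace c
    · by_cases hc : cur.isEmpty
      · simp [PySem.Chars.split₀.go, pvGo2, hsp, hc, ih _ _ (i + 1)]
      · simp [PySem.Chars.split₀.go, pvGo2, hsp, hc, ih _ _ (i + 1)]
    · simp [PySem.Chars.split₀.go, pvGo2, hsp, ih _ _ (i + 1)]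

lemma pvMain (s : List Char) (cs : List Char) : ∀ cur (i st e : Nat),
    st ≤ e → e + cur.length = i → s.drop e = cur.reverse ++ cs →
    (∀ c ∈ cur, PySem.Chars.isspace c = false) →
    (∀ j, st ≤ j → j < e → ∀ (hj : j < s.length), PySem.Chars.isspace s[j] = true) →
    pvAfold s ((pvGo2 cs cur i).map (·.2)) (st : Int) =
      (pvGo2 cs cur i).map (fun p => (p.1 : Int)) := by
  induction cs with
  | nil =>
    intro cur i st e hst hi hdrop hcur hws
    by_cases hc : cur.isEmpty
    · simp [pvGo2, hc, pvAfold]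
    · have hcne : cur ≠ [] := fun h => by simp [h] at hc
      have he : i - cur.length = e := by omega
      have hpre : cur.reverse <+: s.drop e := by
        rw [hdrop, List.append_nil]
      have hfind := pvFindAt s cur.reverse st e hst hpre
        (by simpa using hcne) (fun x hx => hcur x (List.mem_reverse.mp hx)) hws
      simp [pvGo2, hc, pvAfold, hfind, he]
  | cons c rest ih =>
    intro cur i st e hst hi hdrop hcur hws
    by_cases hsp : PySem.Chars.isspace c
    · have hel : e + cur.length < s.length := by
        have := congrArg List.length hdrop
        simp only [List.length_drop, List.length_append, List.length_reverse,
          List.length_cons] at this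
        omega
      by_cases hc : cur.isEmpty
      · have hcur0 : cur = [] := List.isEmpty_iff.mp hc
        subst hcur0
        simp only [List.length_nil, Nat.add_zero] at hi hel
        subst hi
        have hse : s[e] = c := by
          have h0 : (s.drop e)[0]'(by rw [hdrop]; simp) = c := by
            simp only [hdrop, List.reverse_nil, List.nil_append]
            rfl
          rw [List.getElem_drop] at h0
          simpa using h0
        have hdrop1 : s.drop (e + 1) = rest := by
          have h1 : s.drop (e + 1) = (s.drop e).drop 1 := by
            rw [List.drop_drop]
          rw [h1, hdrop]
          rfl
        have hgo : pvGo2 (c :: rest) [] e = pvGo2 rest [] (e + 1) := by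
          simp [pvGo2, hsp]
        rw [hgo]
        exact ih [] (e + 1) st (e + 1) (by omega) (by simp)
          (by simpa using hdrop1) (by simp)
          (fun j hj1 hj2 hj3 => by
            by_cases hje : j = e
            · subst hje; rwa [hse]
            · exact hws j hj1 (by omega) hj3)
      · have hcne : cur ≠ [] := fun h => by simp [h] at hc
        have he : i - cur.length = e := by omega
        have hpre : cur.reverse <+: s.drop e := ⟨c :: rest, hdrop.symm⟩
        have hfind := pvFindAt s cur.reverse st e hst hpre
          (by simpa using hcne) (fun x hx => hcur x (List.mem_reverse.mp hx)) hws
        have hdi : s.drop i = c :: rest := by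
          have h1 : s.drop i = (s.drop e).drop cur.length := by
            rw [List.drop_drop, hi]
          rw [h1, hdrop, show cur.length = cur.reverse.length by simp,
            List.drop_left]
        have hsi : s[i]'(by omega) = c := by
          have h0 : (s.drop i)[0]'(by rw [hdi]; simp) = c := by
            simp only [hdi]; rfl
          rw [List.getElem_drop] at h0
          simpa using h0
        have hdrop1 : s.drop (i + 1) = rest := by
          have h1 : s.drop (i + 1) = (s.drop i).drop 1 := by rw [List.drop_drop]
          rw [h1, hdi]; rfl
        have hgo : pvGo2 (c :: rest) cur i
            = (i - cur.length, cur.reverse) :: pvGo2 rest [] (i + 1) := by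
          simp [pvGo2, hsp, hc]
        rw [hgo]
        simp only [List.map_cons, pvAfold, hfind, he]
        rw [show ((e : Nat) : Int) + ((cur.reverse.length : Nat) : Int) = ((i : Nat) : Int) by
          push_cast [List.length_reverse]; omega]
        refine congrArg (List.cons ((e : Nat) : Int)) ?_
        exact ih [] (i + 1) i (i + 1) (by omega) (by simp)
          (by simpa using hdrop1) (by simp)
          (fun j hj1 hj2 hj3 => by
            have hje : j = i := by omega
            subst hje; rwa [hsi])
    · have hgo : pvGo2 (c :: rest) cur i = pvGo2 rest (c :: cur) (i + 1) := by
        simp [pvGo2, hsp]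
      rw [hgo]
      exact ih (c :: cur) (i + 1) st e hst (by simp; omega)
        (by rw [hdrop, List.reverse_cons, List.append_assoc]; rfl)
        (fun x hx => by
          rcases List.mem_cons.mp hx with h | h
          · subst h; simpa using hsp
          · exact hcur x h)
        hws

lemma pvGo2Bscan (cs : List Char) : ∀ cur (i : Nat),
    (pvGo2 cs cur i).map (fun p => (p.1 : Int)) =
      (if cur.isEmpty then pvBscan cs (i : Int) false
       else ((i - cur.length : Nat) : Int) :: pvBscan cs (i : Int) true) := by
  induction cs with
  | nil =>
    intro cur i
    by_cases hc : cur.isEmpty <;> simp [pvGo2, pvBscan, hc]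
  | cons c rest ih =>
    intro cur i
    by_cases hsp : PySem.Chars.isspace c
    · by_cases hc : cur.isEmpty
      · have := ih [] (i + 1)
        simp only [List.isEmpty_nil, if_true] at this
        simp [pvGo2, pvBscan, hsp, hc, this, Nat.cast_add]
      · have := ih [] (i + 1)
        simp only [List.isEmpty_nil, if_true] at this
        simp [pvGo2, pvBscan, hsp, hc, this, Nat.cast_add]
    · have := ih (c :: cur) (i + 1)
      simp only [List.isEmpty_cons, if_false, Bool.false_eq_true] at this
      by_cases hc : cur.isEmpty
      · have hcur : cur = [] := List.isEmpty_iff.mp hc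
        subst hcur
        simp [pvGo2, pvBscan, hsp, this]
      · simp only [pvGo2, pvBscan, hsp, if_false, Bool.false_eq_true, hc, this]
        have h2 : i + 1 - (c :: cur).length = i - cur.length := by
          simp only [List.length_cons]; omega
        simp

lemma pvFoldA (line : String) : ∀ (ws : List String) (out : List Int) (st : Int),
    ((ws.foldl (fun (acc : List Int × Int) part =>
      let start := PySem.Str.findFrom line part acc.2
      (acc.1 ++ [start], start + PySem.Str.len part)) (out, st))).1
    = out ++ pvAfold line.toList (ws.map String.toList) st := by
  intro ws
  induction ws with
  | nil => intro out st; simp [pvAfold]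
  | cons w ws ih =>
    intro out st
    rw [List.foldl_cons, ih]
    simp [pvAfold, PySem.Str.findFrom_eq, PySem.Str.len_eq]

lemma pvFoldB : ∀ (cs : List Char) (i : Int) (out : List Int) (b : Bool),
    (((PySem.List.enumerate cs i).foldl
      (fun (st : List Int × Bool) ic =>
        if PySem.Chars.isspace ic.2 then (st.1, false)
        else if st.2 then st
        else (st.1 ++ [ic.1], true)) (out, b))).1
    = out ++ pvBscan cs i b := by
  intro cs
  induction cs with
  | nil => intro i out b; simp [PySem.List.enumerate_nil, pvBscan]
  | cons c rest ih =>
    intro i out b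
    rw [PySem.List.enumerate_cons, List.foldl_cons]
    by_cases hsp : PySem.Chars.isspace c
    · simp only [hsp, if_true, pvBscan, ih]
    · cases b with
      | false => simp only [pvBscan, hsp, if_false, Bool.false_eq_true, ih]; simp
      | true => simp only [pvBscan, hsp, if_true, ih]; simp

-- ===== VERDICT (by name: the statement is the Claim_ definition above) =====
theorem get_spaces_format_spec : Claim_equal_get_spaces_format := by
  intro line _
  unfold Spec_get_spaces_format get_spaces_format get_spaces_format_alt
  rw [pvFoldA, pvFoldB, PySem.Str.split₀_map_toList]
  show [] ++ pvAfold line.toList (PySem.Chars.split₀ line.toList) ((0 : Nat) : Int) = _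
  rw [show PySem.Chars.split₀ line.toList = PySem.Chars.split₀.go line.toList [] [] from rfl,
      pvSplitGo line.toList [] [] 0]
  rw [show ([] : List (List Char)).reverse ++ (pvGo2 line.toList [] 0).map (·.2)
        = (pvGo2 line.toList [] 0).map (·.2) from rfl]
  rw [pvMain line.toList line.toList [] 0 0 0 le_rfl (by simp) (by simp) (by simp) (by omega)]
  rw [pvGo2Bscan]
  simp
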